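-- pv_equiv track=rewrite | github.com/Falanke21/Introduction-to-AI | A1/solution.py | check_dead_corner
-- ===== SOURCE A (Python) =====
-- def check_dead_corner(xanadu, other_objs):
--     """
--     Check whether the xanadu is position at the dead corner which it can never escape
--     :param xanadu: the xanadu to check
--     :param other_objs: the objects that the xanadu could potentially collide onto
--     :return: True if it's in dead corner
--     """
--     # check whether the xanadu is at top right
--     is_dead = True
--     for other_obj in other_objs:
--         if xanadu[0] < other_obj[0] or xanadu[1] < other_obj[1]:
--             is_dead = False
--             break
--     if is_dead:
--         return True
--
--     # check whether the xanadu is at top left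
--     is_dead = True
--     for other_obj in other_objs:
--         if xanadu[0] > other_obj[0] or xanadu[1] < other_obj[1]:
--             is_dead = False
--             break
--     if is_dead:
--         return True
--
--     # check whether the xanadu is at bottom right
--     is_dead = True
--     for other_obj in other_objs:
--         if xanadu[0] < other_obj[0] or xanadu[1] > other_obj[1]:
--             is_dead = False
--             break
--     if is_dead:
--         return True
--
--     # check whether the xanadu is at top right
--     is_dead = True
--     for other_obj in other_objs:
--         if xanadu[0] > other_obj[0] or xanadu[1] > other_obj[1]:
--             is_dead = False
--             break
--     if is_dead:
--         return True
-- ===== SOURCE B (Python) =====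
-- def check_dead_corner(xanadu, other_objs):
--     """Bounding-box reformulation: compute min/max of the obstacles once
--     and test the four corner conditions against it."""
--     if not other_objs:
--         return True
--     xs = [o[0] for o in other_objs]
--     ys = [o[1] for o in other_objs]
--     minx, maxx = min(xs), max(xs)
--     miny, maxy = min(ys), max(ys)
--     x0, x1 = xanadu[0], xanadu[1]
--     if (x0 >= maxx and x1 >= maxy) or (x0 <= minx and x1 >= maxy) \
--        or (x0 >= maxx and x1 <= miny) or (x0 <= minx and x1 <= miny):
--         return True
-- ===== Notes on version B (the rewrite author's own statement) =====
-- stated objective: simpler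
-- what changed: Replaces A's four separate break-out scans with one bounding-box computation (min/max of each coordinate) followed by four corner comparisons against that box.
import Mathlib
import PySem

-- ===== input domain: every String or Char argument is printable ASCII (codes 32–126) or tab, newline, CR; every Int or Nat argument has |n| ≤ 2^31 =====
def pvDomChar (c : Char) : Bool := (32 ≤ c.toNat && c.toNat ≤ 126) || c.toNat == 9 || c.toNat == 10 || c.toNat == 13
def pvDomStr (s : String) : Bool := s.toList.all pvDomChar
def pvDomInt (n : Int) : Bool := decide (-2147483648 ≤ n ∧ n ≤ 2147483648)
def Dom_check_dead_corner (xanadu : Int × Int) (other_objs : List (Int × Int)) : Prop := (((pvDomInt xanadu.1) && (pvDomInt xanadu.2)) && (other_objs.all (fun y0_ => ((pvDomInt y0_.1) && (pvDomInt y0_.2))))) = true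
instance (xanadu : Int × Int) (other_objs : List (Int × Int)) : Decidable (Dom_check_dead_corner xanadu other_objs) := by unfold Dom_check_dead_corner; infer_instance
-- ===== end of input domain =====

-- ===== PORT A =====
-- B replaces A's four break-out scans by one bounding box plus four corner tests (simpler).
def pvLoop1 (x : Int × Int) : List (Int × Int) → Bool
  | [] => true
  | o :: rest => if x.1 < o.1 ∨ x.2 < o.2 then false else pvLoop1 x rest

def pvLoop2 (x : Int × Int) : List (Int × Int) → Bool
  | [] => true
  | o :: rest => if x.1 > o.1 ∨ x.2 < o.2 then false else pvLoop2 x rest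

def pvLoop3 (x : Int × Int) : List (Int × Int) → Bool
  | [] => true
  | o :: rest => if x.1 < o.1 ∨ x.2 > o.2 then false else pvLoop3 x rest

def pvLoop4 (x : Int × Int) : List (Int × Int) → Bool
  | [] => true
  | o :: rest => if x.1 > o.1 ∨ x.2 > o.2 then false else pvLoop4 x rest

def check_dead_corner (xanadu : Int × Int) (other_objs : List (Int × Int)) : Option Bool :=
  if pvLoop1 xanadu other_objs then some true
  else if pvLoop2 xanadu other_objs then some true
  else if pvLoop3 xanadu other_objs then some true
  else if pvLoop4 xanadu other_objs then some true
  else none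

-- ===== PORT B =====
def check_dead_corner_alt (xanadu : Int × Int) (other_objs : List (Int × Int)) : Option Bool :=
  match other_objs with
  | [] => some true
  | o :: rest =>
    let xs := (o :: rest).map Prod.fst
    let ys := (o :: rest).map Prod.snd
    let minx := xs.tail.foldl min xs.head!
    let maxx := xs.tail.foldl max xs.head!
    let miny := ys.tail.foldl min ys.head!
    let maxy := ys.tail.foldl max ys.head!
    let x0 := xanadu.1
    let x1 := xanadu.2
    if (x0 ≥ maxx ∧ x1 ≥ maxy) ∨ (x0 ≤ minx ∧ x1 ≥ maxy) ∨
       (x0 ≥ maxx ∧ x1 ≤ miny) ∨ (x0 ≤ minx ∧ x1 ≤ miny) then some true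
    else none

-- ===== PRECONDITION & SPEC =====
def Spec_check_dead_corner (xanadu : Int × Int) (other_objs : List (Int × Int)) (out : Option Bool) : Prop := out = check_dead_corner_alt xanadu other_objs
instance (xanadu : Int × Int) (other_objs : List (Int × Int)) (out : Option Bool) : Decidable (Spec_check_dead_corner xanadu other_objs out) := by unfold Spec_check_dead_corner; infer_instance

-- ===== CLAIM (what is proved, stated in full; the proofs are below) =====
def Claim_equal_check_dead_corner : Prop := ∀ (xanadu : Int × Int) (other_objs : List (Int × Int)), Dom_check_dead_corner xanadu other_objs → Spec_check_dead_corner xanadu other_objs (check_dead_corner xanadu other_objs)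

-- ===== LEMMAS AND PROOFS =====
theorem pv_foldl_max_le (a b : Int) (l : List Int) :
    l.foldl max b ≤ a ↔ b ≤ a ∧ ∀ x ∈ l, x ≤ a := by
  induction l generalizing b with
  | nil => simp
  | cons hd t ih => simp [List.foldl_cons, ih]; tauto

theorem pv_le_foldl_min (a b : Int) (l : List Int) :
    a ≤ l.foldl min b ↔ a ≤ b ∧ ∀ x ∈ l, a ≤ x := by
  induction l generalizing b with
  | nil => simp
  | cons hd t ih => simp [List.foldl_cons, ih]; tauto

theorem pv_foldl_max_map_le (a b : Int) (l : List (Int × Int)) (f : Int × Int → Int) :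
    ((l.map f).foldl max b ≤ a) ↔ b ≤ a ∧ ∀ p ∈ l, f p ≤ a := by
  rw [pv_foldl_max_le]; simp only [List.forall_mem_map]

theorem pv_le_foldl_min_map (a b : Int) (l : List (Int × Int)) (f : Int × Int → Int) :
    (a ≤ (l.map f).foldl min b) ↔ a ≤ b ∧ ∀ p ∈ l, a ≤ f p := by
  rw [pv_le_foldl_min]; simp only [List.forall_mem_map]

theorem pvLoop1_iff (x : Int × Int) (l : List (Int × Int)) :
    pvLoop1 x l = true ↔ ∀ o ∈ l, o.1 ≤ x.1 ∧ o.2 ≤ x.2 := by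
  induction l with
  | nil => simp [pvLoop1]
  | cons hd t ih =>
    simp only [pvLoop1, List.mem_cons]
    split <;> rename_i hc
    · constructor
      · intro h'; cases h'
      · intro h'
        have := h' hd (Or.inl rfl)
        omega
    · simp only [ih]
      constructor
      · intro h' o ho
        rcases ho with rfl | ho
        · omega
        · exact h' o ho
      · intro h' o ho; exact h' o (Or.inr ho)

theorem pvLoop2_iff (x : Int × Int) (l : List (Int × Int)) :
    pvLoop2 x l = true ↔ ∀ o ∈ l, x.1 ≤ o.1 ∧ o.2 ≤ x.2 := by
  induction l with
  | nil => simp [pvLoop2]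
  | cons hd t ih =>
    simp only [pvLoop2, List.mem_cons]
    split <;> rename_i hc
    · constructor
      · intro h'; cases h'
      · intro h'
        have := h' hd (Or.inl rfl)
        omega
    · simp only [ih]
      constructor
      · intro h' o ho
        rcases ho with rfl | ho
        · omega
        · exact h' o ho
      · intro h' o ho; exact h' o (Or.inr ho)

theorem pvLoop3_iff (x : Int × Int) (l : List (Int × Int)) :
    pvLoop3 x l = true ↔ ∀ o ∈ l, o.1 ≤ x.1 ∧ x.2 ≤ o.2 := by
  induction l with
  | nil => simp [pvLoop3]
  | cons hd t ih =>
    simp only [pvLoop3, List.mem_cons]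
    split <;> rename_i hc
    · constructor
      · intro h'; cases h'
      · intro h'
        have := h' hd (Or.inl rfl)
        omega
    · simp only [ih]
      constructor
      · intro h' o ho
        rcases ho with rfl | ho
        · omega
        · exact h' o ho
      · intro h' o ho; exact h' o (Or.inr ho)

theorem pvLoop4_iff (x : Int × Int) (l : List (Int × Int)) :
    pvLoop4 x l = true ↔ ∀ o ∈ l, x.1 ≤ o.1 ∧ x.2 ≤ o.2 := by
  induction l with
  | nil => simp [pvLoop4]
  | cons hd t ih =>
    simp only [pvLoop4, List.mem_cons]
    split <;> rename_i hc
    · constructor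
      · intro h'; cases h'
      · intro h'
        have := h' hd (Or.inl rfl)
        omega
    · simp only [ih]
      constructor
      · intro h' o ho
        rcases ho with rfl | ho
        · omega
        · exact h' o ho
      · intro h' o ho; exact h' o (Or.inr ho)

theorem pv_forall_split (x : Int × Int) (rest : List (Int × Int))
    (f g : Int × Int → Int → Prop) :
    (∀ p ∈ rest, f p x.1 ∧ g p x.2) ↔ (∀ p ∈ rest, f p x.1) ∧ (∀ p ∈ rest, g p x.2) := by
  constructor
  · exact fun h => ⟨fun p hp => (h p hp).1, fun p hp => (h p hp).2⟩
  · exact fun h p hp => ⟨h.1 p hp, h.2 p hp⟩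

-- ===== VERDICT (by name: the statement is the Claim_ definition above) =====
set_option maxHeartbeats 1000000 in
theorem check_dead_corner_spec : Claim_equal_check_dead_corner := by
  intro x objs _
  unfold Spec_check_dead_corner check_dead_corner check_dead_corner_alt
  cases objs with
  | nil => simp [pvLoop1]
  | cons o rest =>
    simp only [List.map_cons, List.tail_cons, List.head!_cons]
    have hmax1 := pv_foldl_max_map_le x.1 o.1 rest Prod.fst
    have hmin1 := pv_le_foldl_min_map x.1 o.1 rest Prod.fst
    have hmax2 := pv_foldl_max_map_le x.2 o.2 rest Prod.snd
    have hmin2 := pv_le_foldl_min_map x.2 o.2 rest Prod.snd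
    have h1 := pvLoop1_iff x (o :: rest)
    have h2 := pvLoop2_iff x (o :: rest)
    have h3 := pvLoop3_iff x (o :: rest)
    have h4 := pvLoop4_iff x (o :: rest)
    simp only [List.mem_cons, forall_eq_or_imp,
      pv_forall_split x rest (fun p a => p.1 ≤ a) (fun p a => p.2 ≤ a),
      pv_forall_split x rest (fun p a => a ≤ p.1) (fun p a => p.2 ≤ a),
      pv_forall_split x rest (fun p a => p.1 ≤ a) (fun p a => a ≤ p.2),
      pv_forall_split x rest (fun p a => a ≤ p.1) (fun p a => a ≤ p.2)] at h1 h2 h3 h4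
    have E1 : pvLoop1 x (o :: rest) = true ↔
        ((rest.map Prod.fst).foldl max o.1 ≤ x.1 ∧ (rest.map Prod.snd).foldl max o.2 ≤ x.2) := by
      rw [h1, hmax1, hmax2]
      exact ⟨fun ⟨⟨a, b⟩, c, d⟩ => ⟨⟨a, c⟩, ⟨b, d⟩⟩, fun ⟨⟨a, c⟩, ⟨b, d⟩⟩ => ⟨⟨a, b⟩, c, d⟩⟩
    have E2 : pvLoop2 x (o :: rest) = true ↔
        (x.1 ≤ (rest.map Prod.fst).foldl min o.1 ∧ (rest.map Prod.snd).foldl max o.2 ≤ x.2) := by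
      rw [h2, hmin1, hmax2]
      exact ⟨fun ⟨⟨a, b⟩, c, d⟩ => ⟨⟨a, c⟩, ⟨b, d⟩⟩, fun ⟨⟨a, c⟩, ⟨b, d⟩⟩ => ⟨⟨a, b⟩, c, d⟩⟩
    have E3 : pvLoop3 x (o :: rest) = true ↔
        ((rest.map Prod.fst).foldl max o.1 ≤ x.1 ∧ x.2 ≤ (rest.map Prod.snd).foldl min o.2) := by
      rw [h3, hmax1, hmin2]
      exact ⟨fun ⟨⟨a, b⟩, c, d⟩ => ⟨⟨a, c⟩, ⟨b, d⟩⟩, fun ⟨⟨a, c⟩, ⟨b, d⟩⟩ => ⟨⟨a, b⟩, c, d⟩⟩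
    have E4 : pvLoop4 x (o :: rest) = true ↔
        (x.1 ≤ (rest.map Prod.fst).foldl min o.1 ∧ x.2 ≤ (rest.map Prod.snd).foldl min o.2) := by
      rw [h4, hmin1, hmin2]
      exact ⟨fun ⟨⟨a, b⟩, c, d⟩ => ⟨⟨a, c⟩, ⟨b, d⟩⟩, fun ⟨⟨a, c⟩, ⟨b, d⟩⟩ => ⟨⟨a, b⟩, c, d⟩⟩
    clear hmax1 hmin1 hmax2 hmin2 h1 h2 h3 h4
    simp only [E1, E2, E3, E4, ge_iff_le]
    split_ifs <;> first | rfl | tauto
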